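-- pv_equiv track=rewrite | github.com/cybernoxXx/commaFormattedNumbers | main.py | commaFormat
-- ===== SOURCE A (Python) =====
-- def commaFormat(number):
--
--     strNumber = (str(number))
--     isFloating = False
--     integerPart = ''
--     decimalPart = ''
--     commaConversion = ''
--     countingComma = 0
--
--     # Cycling the string number to split the decimal part and the integer part
--     for element in strNumber:
--         # Checking from left to right so if I found a point the remaining numbers are decimal part
--         if element == '.':
--             isFloating = True
--
--         if isFloating:
--             # I have no more integer part, I found a point
--             decimalPart = decimalPart + element
--         else:
--             # Not found yet a point so it's integer part
--             integerPart = integerPart + element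
--
--     # Adding comma to integer part, I consider the integer part from right to left
--     for i in range(len(integerPart)-1, -1, -1):
--         commaConversion = integerPart[i] + commaConversion
--         countingComma += 1
--
--         # If I consider three number and I'm not at the end of the integer part I add a comma
--         if countingComma == 3 and i != 0:
--             commaConversion = ',' + commaConversion
--             # Restarting the counting to check if I have other 3 numbers after
--             countingComma = 0
--
--     return commaConversion + decimalPart
-- ===== SOURCE B (Python) =====
-- def commaFormat(number):
--     s = str(number)
--     groups = [s[max(0, i - 3):i] for i in range(len(s), 0, -3)]
--     return ','.join(reversed(groups))
-- ===== Notes on version B (the rewrite author's own statement) =====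
-- stated objective: simpler
-- what changed: Replaces the two character-by-character accumulator loops (dot-splitting pass plus right-to-left per-character comma counter) by a single slice comprehension that cuts the string into three-character chunks from the right and joins them with commas; since the input is an int, str(number) never contains a dot, and the leading '-' is grouped like a digit exactly as A does.
import Mathlib
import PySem

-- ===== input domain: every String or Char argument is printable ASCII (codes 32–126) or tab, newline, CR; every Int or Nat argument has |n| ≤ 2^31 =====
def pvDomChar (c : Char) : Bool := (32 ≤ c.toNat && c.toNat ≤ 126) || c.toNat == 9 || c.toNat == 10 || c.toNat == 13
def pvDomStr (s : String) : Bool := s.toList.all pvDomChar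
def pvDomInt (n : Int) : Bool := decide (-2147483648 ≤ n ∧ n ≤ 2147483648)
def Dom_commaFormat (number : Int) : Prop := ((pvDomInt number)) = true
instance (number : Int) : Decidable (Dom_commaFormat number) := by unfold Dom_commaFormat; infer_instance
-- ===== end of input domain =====

-- B replaces A's two per-character accumulator loops by slicing the decimal string of the
-- int into three-character chunks from the right and joining them with commas (objective: simpler).


-- ===== PORT A =====
-- first loop body: split into integer part / decimal part at the first '.'
def pvStepSplit (st : Bool × List Char × List Char) (element : Char) : Bool × List Char × List Char :=
  let isFloating := if element = '.' then true else st.1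
  if isFloating then (isFloating, st.2.1, st.2.2 ++ [element])
  else (isFloating, st.2.1 ++ [element], st.2.2)

-- second loop body: prepend integerPart[i], count, insert ',' after every third char unless i = 0
-- (integerPart[i] via pyGetD: i is always in range in this loop, so the default is never read)
def pvStepComma (integerPart : List Char) (st : List Char × Int) (i : Int) : List Char × Int :=
  let commaConversion := PySem.List.pyGetD integerPart i '!' :: st.1
  let countingComma := st.2 + 1
  if countingComma = 3 ∧ i ≠ 0 then (',' :: commaConversion, 0) else (commaConversion, countingComma)

def commaFormat (number : Int) : String :=
  let strNumber := PySem.Int.toChars number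
  let s := strNumber.foldl pvStepSplit (false, [], [])
  let integerPart := s.2.1
  let decimalPart := s.2.2
  let r := (PySem.List.pyRange ((integerPart.length : Int) - 1) (-1) (-1)).foldl
              (pvStepComma integerPart) ([], 0)
  String.ofList (r.1 ++ decimalPart)

-- ===== PORT B =====
def commaFormat_alt (number : Int) : String :=
  let s := PySem.Int.toStr number
  let groups := (PySem.List.pyRange (PySem.Str.len s) 0 (-3)).map
                  (fun i => PySem.Str.slice s (some (max 0 (i - 3))) (some i))
  PySem.Str.join "," groups.reverse

-- ===== PRECONDITION & SPEC =====
def Spec_commaFormat (number : Int) (out : String) : Prop := out = commaFormat_alt number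
instance (number : Int) (out : String) : Decidable (Spec_commaFormat number out) := by unfold Spec_commaFormat; infer_instance

-- ===== CLAIM (what is proved, stated in full; the proofs are below) =====
def Claim_equal_commaFormat : Prop := ∀ (number : Int), Dom_commaFormat number → Spec_commaFormat number (commaFormat number)

-- ===== LEMMAS AND PROOFS =====

-- the common value both programs compute on the dot-free digit string: groups of three from the right
def pvGroup3 (l : List Char) : List Char :=
  if l.length ≤ 3 then l
  else pvGroup3 (l.take (l.length - 3)) ++ ',' :: l.drop (l.length - 3)
termination_by l.length
decreasing_by simp [List.length_take]; omega

lemma pvDigitChar_ne_dot (m : Nat) (h : m < 10) : Nat.digitChar m ≠ '.' := by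
  interval_cases m <;> decide

lemma pvToDigitsCore_ne_dot (fuel n : Nat) (acc : List Char)
    (hacc : ∀ c ∈ acc, c ≠ '.') : ∀ c ∈ Nat.toDigitsCore 10 fuel n acc, c ≠ '.' := by
  induction fuel generalizing n acc with
  | zero => simpa [Nat.toDigitsCore]
  | succ f ih =>
    intro c hc
    simp only [Nat.toDigitsCore] at hc
    have hd : ∀ c ∈ Nat.digitChar (n % 10) :: acc, c ≠ '.' := by
      intro c hc'
      rcases List.mem_cons.mp hc' with h' | h'
      · exact h' ▸ pvDigitChar_ne_dot _ (Nat.mod_lt _ (by norm_num))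
      · exact hacc _ h'
    split at hc
    · exact hd _ hc
    · exact ih _ _ hd _ hc

lemma pvDot_not_mem_toChars (n : Int) : '.' ∉ PySem.Int.toChars n := by
  unfold PySem.Int.toChars Nat.toDigits
  split <;> intro h
  · rcases List.mem_cons.mp h with h' | h'
    · exact absurd h'.symm (by decide)
    · exact pvToDigitsCore_ne_dot _ _ [] (by simp) _ h' rfl
  · exact pvToDigitsCore_ne_dot _ _ [] (by simp) _ h rfl

lemma pvSplit_no_dot (l : List Char) (acc : List Char) (h : '.' ∉ l) :
    l.foldl pvStepSplit (false, acc, []) = (false, acc ++ l, []) := by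
  induction l generalizing acc with
  | nil => simp
  | cons c t ih =>
    have hc : c ≠ '.' := fun hh => h (hh ▸ List.mem_cons_self)
    have ht : '.' ∉ t := fun hh => h (List.mem_cons_of_mem _ hh)
    simp only [List.foldl_cons, pvStepSplit, if_neg hc, if_neg (Bool.false_ne_true), ih _ ht]
    simp

lemma pvSeg3 (l : List Char) (m : Nat) (h4 : 4 ≤ m) (hm : m ≤ l.length) :
    List.take 3 (List.drop (m - 3) l) = [l.getD (m-3) '!', l.getD (m-2) '!', l.getD (m-1) '!'] := by
  apply List.ext_getElem
  · simp; omega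
  · intro i h1 h2
    have hi : i < 3 := by simp at h2; omega
    simp only [List.getElem_take, List.getElem_drop]
    interval_cases i
    · simp only [List.getElem_cons_zero]
      rw [List.getD_eq_getElem _ _ (by omega)]
      congr 1
    · simp only [List.getElem_cons_succ, List.getElem_cons_zero]
      rw [List.getD_eq_getElem _ _ (by omega)]
      congr 1
      omega
    · simp only [List.getElem_cons_succ, List.getElem_cons_zero]
      rw [List.getD_eq_getElem _ _ (by omega)]
      congr 1
      omega

lemma pvTakeMap (l : List Char) (m : Nat) (hm : m ≤ l.length) :
    l.take m = (List.range m).map (fun k => l.getD k '!') := by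
  apply List.ext_getElem
  · simp; omega
  · intro i hi1 hi2
    have hil : i < l.length := by simp at hi1; omega
    simp only [List.getElem_take, List.getElem_map, List.getElem_range]
    rw [List.getD_eq_getElem _ _ hil]

lemma pvA_loop (l : List Char) (m : Nat) (acc : List Char) (hm : m ≤ l.length) :
    ((PySem.List.pyRange ((m : Int) - 1) (-1) (-1)).foldl (pvStepComma l) (acc, 0)).1
      = pvGroup3 (l.take m) ++ acc := by
  induction m using Nat.strong_induction_on generalizing acc with
  | _ m ih =>
    rcases Nat.lt_or_ge m 1 with h0 | h1
    · have hm0 : m = 0 := by omega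
      subst hm0
      rw [show (((0:Nat):Int) - 1) = -1 from by norm_num,
        PySem.List.pyRange_neg_one_eq_nil (by norm_num)]
      simp [pvGroup3]
    · rcases Nat.lt_or_ge m 4 with h3 | h4
      · -- 1 ≤ m ≤ 3 : no comma inserted
        have hres : pvGroup3 (l.take m) = l.take m := by
          rw [pvGroup3, if_pos (by simp [List.length_take]; omega)]
        rw [hres, pvTakeMap l m hm]
        interval_cases m
        · rw [show (((1:Nat):Int) - 1) = 0 from by norm_num,
            PySem.List.pyRange_neg_one_cons (by norm_num),
            show ((0:Int) - 1) = -1 from by norm_num,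
            PySem.List.pyRange_neg_one_eq_nil (by norm_num)]
          norm_num [pvStepComma, List.range_succ]
          rw [show (0:Int) = ((0:Nat):Int) from rfl, PySem.List.pyGetD_natCast]
          rfl
        · rw [show (((2:Nat):Int) - 1) = 1 from by norm_num,
            PySem.List.pyRange_neg_one_cons (by norm_num),
            show ((1:Int) - 1) = 0 from by norm_num,
            PySem.List.pyRange_neg_one_cons (by norm_num),
            show ((0:Int) - 1) = -1 from by norm_num,
            PySem.List.pyRange_neg_one_eq_nil (by norm_num)]
          norm_num [pvStepComma, List.range_succ]
          rw [show (0:Int) = ((0:Nat):Int) from rfl, PySem.List.pyGetD_natCast,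
            show (1:Int) = ((1:Nat):Int) from rfl, PySem.List.pyGetD_natCast]
          simp
        · rw [show (((3:Nat):Int) - 1) = 2 from by norm_num,
            PySem.List.pyRange_neg_one_cons (by norm_num),
            show ((2:Int) - 1) = 1 from by norm_num,
            PySem.List.pyRange_neg_one_cons (by norm_num),
            show ((1:Int) - 1) = 0 from by norm_num,
            PySem.List.pyRange_neg_one_cons (by norm_num),
            show ((0:Int) - 1) = -1 from by norm_num,
            PySem.List.pyRange_neg_one_eq_nil (by norm_num)]
          norm_num [pvStepComma, List.range_succ]
          rw [show (0:Int) = ((0:Nat):Int) from rfl, PySem.List.pyGetD_natCast,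
            show (1:Int) = ((1:Nat):Int) from rfl, PySem.List.pyGetD_natCast,
            show (2:Int) = ((2:Nat):Int) from rfl, PySem.List.pyGetD_natCast]
          simp
      · -- m ≥ 4 : three characters then a comma, recurse
        rw [PySem.List.pyRange_neg_one_cons (show (-1:Int) < (m:Int) - 1 from by omega),
          show ((m:Int) - 1 - 1) = (m:Int) - 2 from by ring,
          PySem.List.pyRange_neg_one_cons (show (-1:Int) < (m:Int) - 2 from by omega),
          show ((m:Int) - 2 - 1) = (m:Int) - 3 from by ring,
          PySem.List.pyRange_neg_one_cons (show (-1:Int) < (m:Int) - 3 from by omega),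
          show ((m:Int) - 3 - 1) = ((m - 3 : Nat):Int) - 1 from by omega]
        simp only [List.foldl_cons]
        rw [show pvStepComma l (acc, 0) ((m:Int) - 1)
              = (PySem.List.pyGetD l ((m:Int) - 1) '!' :: acc, 1) from by
            simp [pvStepComma]]
        rw [show pvStepComma l (PySem.List.pyGetD l ((m:Int) - 1) '!' :: acc, 1) ((m:Int) - 2)
              = (PySem.List.pyGetD l ((m:Int) - 2) '!'
                  :: PySem.List.pyGetD l ((m:Int) - 1) '!' :: acc, 2) from by
            simp [pvStepComma]]
        rw [show pvStepComma l (PySem.List.pyGetD l ((m:Int) - 2) '!'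
                  :: PySem.List.pyGetD l ((m:Int) - 1) '!' :: acc, 2) ((m:Int) - 3)
              = (',' :: PySem.List.pyGetD l ((m:Int) - 3) '!'
                  :: PySem.List.pyGetD l ((m:Int) - 2) '!'
                  :: PySem.List.pyGetD l ((m:Int) - 1) '!' :: acc, 0) from by
            unfold pvStepComma
            rw [if_pos ⟨by norm_num, by omega⟩]]
        rw [ih (m - 3) (by omega) _ (by omega)]
        conv_rhs => rw [pvGroup3]
        rw [if_neg (by simp [List.length_take]; omega)]
        have hlen : (l.take m).length = m := by simp [List.length_take]; omega
        rw [hlen, List.take_take, List.drop_take, Nat.min_eq_left (by omega),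
          show m - (m - 3) = 3 from by omega, pvSeg3 l m h4 hm,
          show ((m:Int) - 3) = ((m - 3 : Nat):Int) from by omega, PySem.List.pyGetD_natCast,
          show ((m:Int) - 2) = ((m - 2 : Nat):Int) from by omega, PySem.List.pyGetD_natCast,
          show ((m:Int) - 1) = ((m - 1 : Nat):Int) from by omega, PySem.List.pyGetD_natCast]
        simp

lemma pvJoin_append (sep y : List Char) (xs : List (List Char)) (h : xs ≠ []) :
    PySem.Chars.join sep (xs ++ [y]) = PySem.Chars.join sep xs ++ sep ++ y := by
  induction xs with
  | nil => simp at h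
  | cons a t ih =>
    cases t with
    | nil => simp [PySem.Chars.join_cons_cons, PySem.Chars.join_singleton]
    | cons b t' =>
      have h1 : (a :: b :: t') ++ [y] = a :: ((b :: t') ++ [y]) := by simp
      rw [h1, show a :: ((b :: t') ++ [y]) = a :: b :: (t' ++ [y]) from rfl,
        PySem.Chars.join_cons_cons, show b :: (t' ++ [y]) = (b :: t') ++ [y] from rfl,
        ih (by simp), PySem.Chars.join_cons_cons]
      simp

lemma pvRange3_nil (a : Int) (h : a ≤ 0) : PySem.List.pyRange a 0 (-3) = [] := by
  simp only [PySem.List.pyRange]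
  norm_num
  intro h'
  omega

lemma pvRange3_cons (a : Int) (h : 0 < a) :
    PySem.List.pyRange a 0 (-3) = a :: PySem.List.pyRange (a - 3) 0 (-3) := by
  simp only [PySem.List.pyRange]
  norm_num
  rw [if_pos h]
  by_cases h3 : 3 < a
  · rw [if_pos h3, show ((a + 3 - 1) / 3).toNat = ((a - 1) / 3).toNat + 1 from by omega,
      List.range_succ_eq_map]
    simp only [List.map_cons, List.map_map]
    norm_num
    intro k _
    ring
  · rw [if_neg h3, show ((a + 3 - 1) / 3).toNat = 1 from by omega]
    simp

lemma pvB_loop (l : List Char) (m : Nat) (hm : m ≤ l.length) :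
    PySem.Chars.join [','] (((PySem.List.pyRange (m : Int) 0 (-3)).map
        (fun i => PySem.Chars.slice l (some (max 0 (i - 3))) (some i))).reverse)
      = pvGroup3 (l.take m) := by
  induction m using Nat.strong_induction_on with
  | _ m ih =>
    rcases Nat.lt_or_ge m 1 with h0 | h1
    · have hm0 : m = 0 := by omega
      subst hm0
      rw [show ((0:Nat):Int) = 0 from rfl, pvRange3_nil 0 le_rfl]
      simp [PySem.Chars.join_nil, pvGroup3]
    · rcases Nat.lt_or_ge m 4 with h3 | h4
      · -- 1 ≤ m ≤ 3 : single group
        rw [pvRange3_cons _ (by exact_mod_cast h1), pvRange3_nil _ (by omega)]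
        simp only [List.map_cons, List.map_nil, List.reverse_cons, List.reverse_nil,
          List.nil_append, PySem.Chars.join_singleton]
        rw [show max 0 ((m : Int) - 3) = 0 from by omega]
        simp only [PySem.Chars.slice]
        rw [show (0:Int) = ((0:Nat):Int) from rfl, PySem.List.slice_natCast]
        rw [pvGroup3]
        rw [if_pos (by simp [List.length_take]; omega)]
        simp
      · -- m ≥ 4 : peel the last three characters
        rw [pvRange3_cons _ (by omega)]
        simp only [List.map_cons, List.reverse_cons]
        have hrest : PySem.List.pyRange ((m : Int) - 3) 0 (-3) ≠ [] := by
          rw [pvRange3_cons _ (by omega)]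
          simp
        have hne : ((PySem.List.pyRange ((m : Int) - 3) 0 (-3)).map
            (fun i => PySem.Chars.slice l (some (max 0 (i - 3))) (some i))).reverse ≠ [] := by
          simpa using hrest
        rw [pvJoin_append _ _ _ hne]
        have hcast : ((m : Int) - 3) = ((m - 3 : Nat) : Int) := by omega
        rw [hcast, ih (m - 3) (by omega) (by omega)]
        rw [max_eq_right (by positivity : (0:Int) ≤ ((m - 3 : Nat) : Int))]
        simp only [PySem.Chars.slice]
        rw [PySem.List.slice_natCast]
        conv_rhs => rw [pvGroup3]
        rw [if_neg (by simp [List.length_take]; omega)]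
        have hlen : (l.take m).length = m := by simp [List.length_take]; omega
        rw [hlen, List.take_take, List.drop_take]
        rw [Nat.min_eq_left (by omega)]
        simp

lemma pvA_val (number : Int) :
    commaFormat number = String.ofList (pvGroup3 (PySem.Int.toChars number)) := by
  unfold commaFormat
  dsimp only
  rw [pvSplit_no_dot _ [] (pvDot_not_mem_toChars number)]
  simp only [List.nil_append]
  rw [pvA_loop (PySem.Int.toChars number) (PySem.Int.toChars number).length [] le_rfl]
  simp [List.take_length]

lemma pvB_val (number : Int) :
    commaFormat_alt number = String.ofList (pvGroup3 (PySem.Int.toChars number)) := by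
  unfold commaFormat_alt
  dsimp only
  simp only [PySem.Str.join]
  apply congrArg
  rw [List.map_reverse]
  have hmap : ∀ gs : List Int, gs.map (fun i => (PySem.Str.slice (PySem.Int.toStr number)
        (some (max 0 (i - 3))) (some i)).toList)
      = gs.map (fun i => PySem.Chars.slice (PySem.Int.toChars number)
        (some (max 0 (i - 3))) (some i)) := by
    intro gs
    apply List.map_congr_left
    intro i _
    rw [PySem.Str.toList_slice, PySem.Int.toList_toStr]
  rw [List.map_map]
  simp only [Function.comp_def]
  rw [hmap, show (",".toList) = [','] from rfl,
    show PySem.Str.len (PySem.Int.toStr number)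
      = (((PySem.Int.toChars number).length : Nat) : Int) from by
        rw [PySem.Str.len_eq, PySem.Int.toList_toStr],
    pvB_loop (PySem.Int.toChars number) (PySem.Int.toChars number).length le_rfl,
    List.take_length]

-- ===== VERDICT (by name: the statement is the Claim_ definition above) =====
theorem commaFormat_spec : Claim_equal_commaFormat := by
  intro number _
  unfold Spec_commaFormat
  rw [pvA_val, pvB_val]
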